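-- pv_equiv track=rewrite | github.com/aniketGhetla/Football | formation_smoothing.py | fill_unknowns
-- ===== SOURCE A (Python) =====
-- def fill_unknowns(formations):
--     # Forward fill
--     for i in range(1, len(formations)):
--         if formations[i] == "Unknown":
--             formations[i] = formations[i-1]
--     # Backward fill
--     for i in range(len(formations)-2, -1, -1):
--         if formations[i] == "Unknown":
--             formations[i] = formations[i+1]
--     return formations
-- ===== SOURCE B (Python) =====
-- def fill_unknowns(formations):
--     # find index of first known formation
--     first = -1
--     for i, f in enumerate(formations):
--         if f != "Unknown":
--             first = i
--             break
--     if first == -1: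
--         return formations  # all Unknown (or empty): nothing to fill
--     v = formations[first]
--     # leading Unknowns all take the first known value
--     formations[:first] = [v] * first
--     # single forward pass with a running last-known value
--     last = v
--     for i in range(first + 1, len(formations)):
--         if formations[i] == "Unknown":
--             formations[i] = last
--         else:
--             last = formations[i]
--     return formations
-- ===== Notes on version B (the rewrite author's own statement) =====
-- stated objective: simpler
-- what changed: A's two full index passes (forward fill then backward fill) are replaced by one scan for the first non-'Unknown' index, a prefix fill with that value, and a single forward pass carrying a running last-known value.
import Mathlib
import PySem

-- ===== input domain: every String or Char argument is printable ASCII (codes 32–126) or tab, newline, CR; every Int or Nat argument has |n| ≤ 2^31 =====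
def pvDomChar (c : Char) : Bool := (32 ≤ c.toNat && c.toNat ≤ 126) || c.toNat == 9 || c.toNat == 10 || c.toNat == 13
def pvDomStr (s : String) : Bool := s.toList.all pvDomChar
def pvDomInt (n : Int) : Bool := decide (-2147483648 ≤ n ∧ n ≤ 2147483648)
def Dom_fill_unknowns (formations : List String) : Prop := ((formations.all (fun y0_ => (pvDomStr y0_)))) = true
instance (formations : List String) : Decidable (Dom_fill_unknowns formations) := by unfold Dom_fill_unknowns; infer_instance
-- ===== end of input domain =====

-- B replaces A's forward-then-backward index passes by one scan for the first known
-- value, a prefix fill, and a single forward pass with a running last-known value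
-- (objective: simpler / alternative decomposition; return value only — both mutate in place).

-- ===== PORT A =====
-- the body of A's forward loop: if formations[i] == "Unknown": formations[i] = formations[i-1]
def stepF (xs : List String) (i : Int) : List String :=
  if PySem.List.pyGetD xs i "" == "Unknown" then
    PySem.List.pySetD xs i (PySem.List.pyGetD xs (i - 1) "")
  else xs

-- the body of A's backward loop: if formations[i] == "Unknown": formations[i] = formations[i+1]
def stepB (xs : List String) (i : Int) : List String :=
  if PySem.List.pyGetD xs i "" == "Unknown" then
    PySem.List.pySetD xs i (PySem.List.pyGetD xs (i + 1) "")
  else xs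

def fill_unknowns (formations : List String) : List String :=
  let n : Int := (formations.length : Int)
  let f1 := (PySem.List.pyRange 1 n 1).foldl stepF formations
  (PySem.List.pyRange (n - 2) (-1) (-1)).foldl stepB f1

-- ===== PORT B =====
-- B's first loop: scan with break for the index of the first non-"Unknown" element
def findFirstKnown : List String → Nat → Option Nat
  | [], _ => none
  | f :: fs, i => if f != "Unknown" then some i else findFirstKnown fs (i + 1)

-- B's second loop: running (last, filled) accumulator over formations[first:]
def stepAcc (st : String × List String) (f : String) : String × List String :=
  if f == "Unknown" then (st.1, st.2 ++ [st.1]) else (f, st.2 ++ [f])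

def fill_unknowns_alt (formations : List String) : List String :=
  match findFirstKnown formations 0 with
  | none => formations
  | some k =>
    let v := formations.getD k ""
    let filled := ((formations.drop k).foldl stepAcc (v, [])).2
    List.replicate k v ++ filled

-- ===== PRECONDITION & SPEC =====
def Spec_fill_unknowns (formations : List String) (out : List String) : Prop := out = fill_unknowns_alt formations
instance (formations : List String) (out : List String) : Decidable (Spec_fill_unknowns formations out) := by unfold Spec_fill_unknowns; infer_instance

-- ===== CLAIM (what is proved, stated in full; the proofs are below) =====
def Claim_equal_fill_unknowns : Prop := ∀ (formations : List String), Dom_fill_unknowns formations → Spec_fill_unknowns formations (fill_unknowns formations)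

-- ===== LEMMAS AND PROOFS =====

-- reference forward fill (recursive form of both loops' effect)
def fwd (last : String) : List String → List String
  | [] => []
  | f :: fs => if f == "Unknown" then last :: fwd last fs else f :: fwd f fs

theorem getD_append_len {α : Type} [Inhabited α] (pre : List α) (l : List α) (n : Nat) (d : α) :
    (pre ++ l).getD (pre.length + n) d = l.getD n d := by
  induction pre with
  | nil => simp
  | cons p ps ih => simpa [Nat.succ_add] using ih

theorem set_append_len {α : Type} (pre : List α) (l : List α) (n : Nat) (v : α) :
    (pre ++ l).set (pre.length + n) v = pre ++ l.set n v := by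
  induction pre with
  | nil => simp
  | cons p ps ih => simpa [Nat.succ_add] using ih

-- forward loop, general invariant
theorem fwd_loop (suf : List String) : ∀ (pre : List String) (x : String),
    (PySem.List.pyRange ((pre.length : Int) + 1) ((pre.length : Int) + 1 + suf.length) 1).foldl
      stepF (pre ++ x :: suf) = pre ++ x :: fwd x suf := by
  induction suf with
  | nil =>
    intro pre x
    rw [PySem.List.pyRange_one_eq_nil (by simp)]
    simp [fwd]
  | cons s suf' ih =>
    intro pre x
    rw [PySem.List.pyRange_one_cons (by simp [List.length_cons])]
    simp only [List.foldl_cons]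
    have hcast : (pre.length : Int) + 1 = ((pre.length + 1 : Nat) : Int) := by push_cast; ring
    have hstep : stepF (pre ++ x :: s :: suf') ((pre.length : Int) + 1)
        = pre ++ x :: (if s == "Unknown" then x else s) :: suf' := by
      unfold stepF
      rw [hcast, PySem.List.pyGetD_natCast,
        show (((pre.length + 1 : Nat) : Int) - 1) = ((pre.length : Nat) : Int) by push_cast; ring,
        PySem.List.pyGetD_natCast, PySem.List.pySetD_natCast]
      have g1 : (pre ++ x :: s :: suf').getD (pre.length + 1) "" = s := by
        simpa using getD_append_len pre (x :: s :: suf') 1 ""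
      have g0 : (pre ++ x :: s :: suf').getD pre.length "" = x := by
        simpa using getD_append_len pre (x :: s :: suf') 0 ""
      have hset : (pre ++ x :: s :: suf').set (pre.length + 1) x = pre ++ x :: x :: suf' := by
        simpa using set_append_len pre (x :: s :: suf') 1 x
      by_cases hs : (s == "Unknown") = true
      · simp [g1, g0, hs, hset]
      · simp [g1, g0, Bool.eq_false_iff.mpr hs, hset]
    rw [hstep]
    have e1 : (pre.length : Int) + 1 + 1 = ((pre ++ [x]).length : Int) + 1 := by
      push_cast [List.length_append, List.length_cons, List.length_nil]; ring
    have e2 : (pre.length : Int) + 1 + ((s :: suf').length : Int)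
        = ((pre ++ [x]).length : Int) + 1 + (suf'.length : Int) := by
      push_cast [List.length_append, List.length_cons, List.length_nil]; ring
    by_cases hs : (s == "Unknown") = true
    · have := ih (pre ++ [x]) x
      rw [if_pos hs]
      rw [e1, e2]
      simpa [fwd, hs] using this
    · have := ih (pre ++ [x]) s
      rw [if_neg hs]
      rw [e1, e2]
      simpa [fwd, Bool.eq_false_iff.mpr hs] using this

-- all-Unknown lists
theorem fwd_replicate (m : Nat) : fwd "Unknown" (List.replicate m "Unknown") = List.replicate m "Unknown" := by
  induction m with
  | zero => rfl
  | succ m ih => simp [List.replicate_succ, fwd, ih]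

theorem bwd_noop (is : List Int) (l : List String)
    (h : ∀ i ∈ is, (PySem.List.pyGetD l i "" == "Unknown") = false) :
    is.foldl stepB l = l := by
  induction is with
  | nil => rfl
  | cons i is ih =>
    have hstep : stepB l i = l := by
      unfold stepB
      rw [if_neg (by simp [h i (by simp)])]
    simp only [List.foldl_cons, hstep]
    exact ih (fun j hj => h j (by simp [hj]))

theorem set_replicate {α : Type} (n : Nat) : ∀ (j : Nat) (a : α),
    (List.replicate n a).set j a = List.replicate n a := by
  induction n with
  | zero => intro j a; rfl
  | succ n ih =>
    intro j a
    cases j with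
    | zero => simp [List.replicate_succ]
    | succ j => simp [List.replicate_succ, ih]

theorem bwd_replicate (n : Nat) (is : List Int) (h : ∀ i ∈ is, 0 ≤ i ∧ i < (n : Int) - 1) :
    is.foldl stepB (List.replicate n "Unknown") = List.replicate n "Unknown" := by
  induction is with
  | nil => rfl
  | cons i is ih =>
    have h0 := (h i (by simp)).1
    have h1 := (h i (by simp)).2
    have hstep : stepB (List.replicate n "Unknown") i = List.replicate n "Unknown" := by
      unfold stepB
      by_cases hc : (PySem.List.pyGetD (List.replicate n "Unknown") i "" == "Unknown") = true
      · rw [if_pos hc, PySem.List.pySetD_of_nonneg _ _ h0]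
        have hr : PySem.Raise.InRange (List.replicate n "Unknown").length (i + 1) := by
          simp [PySem.Raise.InRange]; omega
        have hU := List.eq_of_mem_replicate
          (PySem.List.pyGetD_mem (List.replicate n "Unknown") (i := i + 1) "" hr)
        rw [hU, set_replicate]
      · rw [if_neg hc]
    simp only [List.foldl_cons, hstep]
    exact ih (fun j hj => h j (by simp [hj]))

-- backward loop filling the leading Unknown prefix
theorem bwd_prefix (k : Nat) : ∀ (v : String) (tail : List String),
    (PySem.List.pyRange ((k : Int) - 1) (-1) (-1)).foldl stepB
      (List.replicate k "Unknown" ++ v :: tail) = List.replicate k v ++ v :: tail := by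
  induction k with
  | zero =>
    intro v tail
    rw [PySem.List.pyRange_neg_one_eq_nil (by norm_num)]
    rfl
  | succ k ih =>
    intro v tail
    have e : ((k + 1 : Nat) : Int) - 1 = (k : Int) := by push_cast; ring
    rw [e, PySem.List.pyRange_neg_one_cons (by omega)]
    simp only [List.foldl_cons]
    have hl : List.replicate (k + 1) "Unknown" ++ v :: tail
        = List.replicate k "Unknown" ++ "Unknown" :: v :: tail := by
      simp [List.replicate_succ']
    have hstep : stepB (List.replicate (k + 1) "Unknown" ++ v :: tail) ((k : Int))
        = List.replicate k "Unknown" ++ v :: v :: tail := by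
      unfold stepB
      rw [hl, PySem.List.pyGetD_natCast,
        show ((k : Int) + 1) = ((k + 1 : Nat) : Int) by push_cast; ring,
        PySem.List.pyGetD_natCast, PySem.List.pySetD_natCast]
      have g0 : (List.replicate k "Unknown" ++ "Unknown" :: v :: tail).getD k "" = "Unknown" := by
        simpa using getD_append_len (List.replicate k "Unknown") ("Unknown" :: v :: tail) 0 ""
      have g1 : (List.replicate k "Unknown" ++ "Unknown" :: v :: tail).getD (k + 1) "" = v := by
        simpa using getD_append_len (List.replicate k "Unknown") ("Unknown" :: v :: tail) 1 ""
      have hset : (List.replicate k "Unknown" ++ "Unknown" :: v :: tail).set k v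
          = List.replicate k "Unknown" ++ v :: v :: tail := by
        simpa using set_append_len (List.replicate k "Unknown") ("Unknown" :: v :: tail) 0 v
      simp [g0, g1, hset]
    rw [hstep, ih v (v :: tail)]
    simp [List.replicate_succ']

theorem fwd_no_unknown (rest : List String) : ∀ (v : String), (v == "Unknown") = false →
    ∀ y ∈ fwd v rest, (y == "Unknown") = false := by
  induction rest with
  | nil => intro v hv y hy; simp [fwd] at hy
  | cons f fs ih =>
    intro v hv y hy
    by_cases hf : (f == "Unknown") = true
    · simp [fwd, hf] at hy
      rcases hy with h | h
      · simpa [h] using hv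
      · exact ih v hv y h
    · simp [fwd, Bool.eq_false_iff.mpr hf] at hy
      rcases hy with h | h
      · subst h; exact Bool.eq_false_iff.mpr hf
      · exact ih f (Bool.eq_false_iff.mpr hf) y h

theorem fwd_through_prefix (k : Nat) : ∀ (v : String) (rest : List String), (v == "Unknown") = false →
    fwd "Unknown" (List.replicate k "Unknown" ++ v :: rest)
      = List.replicate k "Unknown" ++ v :: fwd v rest := by
  induction k with
  | zero => intro v rest hv; simp [fwd, hv]
  | succ k ih => intro v rest hv; simp [List.replicate_succ, fwd, ih v rest hv]

theorem foldl_stepAcc (fs : List String) : ∀ (a : String) (acc : List String),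
    (fs.foldl stepAcc (a, acc)).2 = acc ++ fwd a fs := by
  induction fs with
  | nil => intro a acc; simp [fwd]
  | cons f fs ih =>
    intro a acc
    by_cases hf : (f == "Unknown") = true
    · simp [stepAcc, hf, fwd, ih]
    · simp [stepAcc, Bool.eq_false_iff.mpr hf, fwd, ih]

theorem findFirstKnown_replicate (k : Nat) : ∀ (i : Nat) (v : String) (rest : List String),
    (v == "Unknown") = false →
    findFirstKnown (List.replicate k "Unknown" ++ v :: rest) i = some (i + k) := by
  induction k with
  | zero => intro i v rest hv; simp [findFirstKnown, bne, hv]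
  | succ k ih =>
    intro i v rest hv
    have h1 : findFirstKnown (List.replicate (k + 1) "Unknown" ++ v :: rest) i
        = findFirstKnown (List.replicate k "Unknown" ++ v :: rest) (i + 1) := by
      simp [List.replicate_succ, findFirstKnown]
    rw [h1, ih (i + 1) v rest hv]
    congr 1
    omega

theorem findFirstKnown_none_aux (l : List String) : ∀ (i : Nat), (∀ f ∈ l, f = "Unknown") →
    findFirstKnown l i = none := by
  induction l with
  | nil => intro i _; rfl
  | cons f fs ih =>
    intro i h
    have hf : f = "Unknown" := h f (by simp)
    simp [findFirstKnown, hf, ih (i + 1) (fun g hg => h g (by simp [hg]))]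

theorem findFirstKnown_none (l : List String) (h : ∀ f ∈ l, f = "Unknown") :
    findFirstKnown l 0 = none := findFirstKnown_none_aux l 0 h

theorem decomp (l : List String) :
    (∀ f ∈ l, f = "Unknown") ∨
    ∃ k v rest, l = List.replicate k "Unknown" ++ v :: rest ∧ (v == "Unknown") = false := by
  induction l with
  | nil => left; simp
  | cons f fs ih =>
    by_cases hf : f = "Unknown"
    · rcases ih with h | ⟨k, v, rest, hl, hv⟩
      · left; intro g hg; rcases List.mem_cons.mp hg with h' | h'
        · exact h' ▸ hf
        · exact h g h'
      · right; exact ⟨k + 1, v, rest, by simp [List.replicate_succ, hl, hf], hv⟩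
    · right; exact ⟨0, f, fs, by simp, by simpa using hf⟩

theorem fwd_length (fs : List String) : ∀ a, (fwd a fs).length = fs.length := by
  induction fs with
  | nil => intro a; rfl
  | cons f fs ih => intro a; by_cases hf : (f == "Unknown") = true <;> simp [fwd, hf, ih]

theorem f1_form (k : Nat) (v : String) (rest : List String) (hv : (v == "Unknown") = false) :
    ∃ x xs, List.replicate k "Unknown" ++ v :: rest = x :: xs ∧
      x :: fwd x xs = List.replicate k "Unknown" ++ v :: fwd v rest := by
  cases k with
  | zero => exact ⟨v, rest, by simp, by simp⟩
  | succ k =>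
    exact ⟨"Unknown", List.replicate k "Unknown" ++ v :: rest,
      by simp [List.replicate_succ],
      by simp [List.replicate_succ, fwd, fwd_through_prefix k v rest hv]⟩

-- A's forward pass, specialised to the whole list
theorem forward_phase (x : String) (xs : List String) :
    (PySem.List.pyRange 1 (((x :: xs).length : Int)) 1).foldl stepF (x :: xs)
      = x :: fwd x xs := by
  have h1 : (1 : Int) = ((([] : List String)).length : Int) + 1 := by simp
  have h2 : (((x :: xs).length : Int)) = ((([] : List String)).length : Int) + 1 + (xs.length : Int) := by
    simp; omega
  rw [h1, h2]
  simpa using fwd_loop xs [] x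

-- ===== VERDICT (by name: the statement is the Claim_ definition above) =====
theorem fill_unknowns_unfold (l : List String) :
    fill_unknowns l = (PySem.List.pyRange (((l.length : Int)) - 2) (-1) (-1)).foldl stepB
      ((PySem.List.pyRange 1 ((l.length : Int)) 1).foldl stepF l) := rfl

theorem fill_unknowns_spec : Claim_equal_fill_unknowns := by
  intro l _
  unfold Spec_fill_unknowns
  rcases decomp l with hall | ⟨k, v, rest, hl, hv⟩
  · -- every element is "Unknown" (includes the empty list): both sides return l unchanged
    have hB : fill_unknowns_alt l = l := by
      unfold fill_unknowns_alt
      rw [findFirstKnown_none l hall]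
    rw [hB]
    cases l with
    | nil => rfl
    | cons x xs =>
      have hrep : x :: xs = List.replicate (x :: xs).length "Unknown" :=
        List.eq_replicate_of_mem hall
      rw [fill_unknowns_unfold, forward_phase x xs]
      have hx : x = "Unknown" := hall x (by simp)
      have hxs : xs = List.replicate xs.length "Unknown" :=
        List.eq_replicate_of_mem (fun f hf => hall f (by simp [hf]))
      have hf1 : x :: fwd x xs = x :: xs := by
        rw [hx]
        conv_lhs => rw [hxs]
        rw [fwd_replicate, ← hxs]
      rw [hf1, hrep]
      exact bwd_replicate (x :: xs).length _ (fun i hi => by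
        have h' := PySem.List.mem_pyRange_neg_one.mp (by simpa using hi)
        simp only [List.length_cons] at h' ⊢
        push_cast at h' ⊢
        omega)
  · -- l = "Unknown"^k ++ v :: rest with v known
    obtain ⟨x, xs, hx, hfwd⟩ := f1_form k v rest hv
    have hG : ∀ m, (hm : m < ((v :: fwd v rest)).length) →
        (((v :: fwd v rest))[m] == "Unknown") = false := by
      intro m hm
      have hmem := List.getElem_mem hm
      rcases List.mem_cons.mp hmem with h | h
      · rw [h]; exact hv
      · exact fwd_no_unknown rest v hv _ h
    -- A's value
    have hA : fill_unknowns l = List.replicate k v ++ v :: fwd v rest := by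
      rw [hl, hx, fill_unknowns_unfold, forward_phase, hfwd, ← hx]
      have hlen : ((List.replicate k "Unknown" ++ v :: rest).length : Int)
          = (k : Int) + 1 + (rest.length : Int) := by simp; omega
      have hlenG : (fwd v rest).length = rest.length := fwd_length rest v
      rw [PySem.List.pyRange_neg_one_eq_reverse]
      have hsplit : PySem.List.pyRange (-1 + 1) (((List.replicate k "Unknown" ++ v :: rest).length : Int) - 2 + 1) 1
          = PySem.List.pyRange 0 (k : Int) 1 ++ PySem.List.pyRange (k : Int) (((List.replicate k "Unknown" ++ v :: rest).length : Int) - 2 + 1) 1 := by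
        rw [show (-1 + 1 : Int) = 0 by norm_num]
        exact PySem.List.pyRange_one_append 0 (k : Int) _ (by omega) (by rw [hlen]; omega)
      rw [hsplit, List.reverse_append, List.foldl_append]
      have hphase1 : (PySem.List.pyRange (k : Int) (((List.replicate k "Unknown" ++ v :: rest).length : Int) - 2 + 1) 1).reverse.foldl
          stepB (List.replicate k "Unknown" ++ v :: fwd v rest)
          = List.replicate k "Unknown" ++ v :: fwd v rest := by
        apply bwd_noop
        intro i hi
        have hibnd := PySem.List.mem_pyRange_one.mp (List.mem_reverse.mp hi)
        rw [hlen] at hibnd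
        have hi0 : (0 : Int) ≤ i := by omega
        have hicast : i = ((i.toNat : Nat) : Int) := by omega
        rw [hicast, PySem.List.pyGetD_natCast]
        have hk : i.toNat = k + (i.toNat - k) := by omega
        have hg : (List.replicate k "Unknown" ++ v :: fwd v rest).getD (k + (i.toNat - k)) ""
            = (v :: fwd v rest).getD (i.toNat - k) "" := by
          simpa using getD_append_len (List.replicate k "Unknown") (v :: fwd v rest) (i.toNat - k) ""
        rw [hk, hg]
        have hm : i.toNat - k < (v :: fwd v rest).length := by
          simp [hlenG]; omega
        rw [List.getD_eq_getElem _ _ hm]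
        exact hG _ hm
      rw [hphase1]
      have hrev : (PySem.List.pyRange 0 (k : Int) 1).reverse
          = PySem.List.pyRange ((k : Int) - 1) (-1) (-1) := by
        rw [PySem.List.pyRange_neg_one_eq_reverse]
        norm_num
      rw [hrev]
      exact bwd_prefix k v (fwd v rest)
    -- B's value
    have hBfind : findFirstKnown l 0 = some k := by
      rw [hl]; simpa using findFirstKnown_replicate k 0 v rest hv
    have hBget : l.getD k "" = v := by
      rw [hl]
      simpa using getD_append_len (List.replicate k "Unknown") (v :: rest) 0 ""
    have hBdrop : l.drop k = v :: rest := by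
      rw [hl]
      exact List.drop_left' (by simp)
    have hB : fill_unknowns_alt l = List.replicate k v ++ v :: fwd v rest := by
      unfold fill_unknowns_alt
      rw [hBfind]
      simp only [hBget, hBdrop]
      rw [foldl_stepAcc (v :: rest) v []]
      simp [fwd, hv]
    rw [hA, hB]
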